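-- pv_equiv track=rewrite | github.com/LEGO-ICSE25/LEGO | pycg/machinery/callgraph.py | api_identification
-- ===== SOURCE A (Python) =====
-- def api_identification(call_graph, node):
--     source_nodes = []
--
--     def dfs(current_node, visited):
--         visited.add(current_node)
--         if current_node not in call_graph:
--             source_nodes.append(current_node)
--             return
--         for next_node in call_graph[current_node]:
--             if next_node not in visited:
--                 dfs(next_node, visited)
--
--     dfs(node, set())
--
--     return source_nodes
-- ===== SOURCE B (Python) =====
-- def api_identification(call_graph, node):
--     # Iterative DFS with an explicit stack of child iterators (same pre-order leaf output, no recursion).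
--     visited = {node}
--     if node not in call_graph:
--         return [node]
--     source_nodes = []
--     stack = [iter(call_graph[node])]
--     while stack:
--         try:
--             child = next(stack[-1])
--         except StopIteration:
--             stack.pop()
--             continue
--         if child in visited:
--             continue
--         visited.add(child)
--         if child in call_graph:
--             stack.append(iter(call_graph[child]))
--         else:
--             source_nodes.append(child)
--     return source_nodes
-- ===== Notes on version B (the rewrite author's own statement) =====
-- stated objective: alternative
-- what changed: The recursive DFS with a mutated accumulator is replaced by an iterative DFS over an explicit stack of child iterators (root leaf case handled up front), preserving the exact pre-order leaf output.
import Mathlib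
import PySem

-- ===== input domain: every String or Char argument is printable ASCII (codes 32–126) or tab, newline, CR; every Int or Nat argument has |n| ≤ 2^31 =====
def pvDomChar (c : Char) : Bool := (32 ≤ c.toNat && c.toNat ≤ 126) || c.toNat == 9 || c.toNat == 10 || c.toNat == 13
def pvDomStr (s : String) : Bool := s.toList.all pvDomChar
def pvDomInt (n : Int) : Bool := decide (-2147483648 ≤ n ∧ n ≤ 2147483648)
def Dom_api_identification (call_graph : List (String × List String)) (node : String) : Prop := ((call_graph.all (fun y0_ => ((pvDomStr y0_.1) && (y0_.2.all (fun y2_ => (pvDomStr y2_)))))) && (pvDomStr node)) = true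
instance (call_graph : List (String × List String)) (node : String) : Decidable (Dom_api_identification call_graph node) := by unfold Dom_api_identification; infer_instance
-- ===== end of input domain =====

-- B replaces A's recursive DFS by an iterative DFS over an explicit stack of child
-- iterators (same pre-order leaf output); alternative decomposition, not claimed faster.

-- ===== PORT A =====
-- A's recursion depth is bounded by the number of distinct callee names, so the fuel
-- (#all callees + 1) is never exhausted; the fuel-0 branch is unreachable.
mutual
  -- the body of Python's `dfs(current_node, visited)` (state = (visited, source_nodes))
  def pvDfsA (call_graph : List (String × List String)) :
      Nat → String → PySem.Set String × List String → PySem.Set String × List String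
    | 0, _, st => st
    | f + 1, cur, st =>
      let v := PySem.Set.add st.1 cur
      match call_graph.lookup cur with
      | none => (v, st.2 ++ [cur])
      | some ch => pvDfsAL call_graph f ch (v, st.2)
  termination_by f _ _ => (f, 0)

  -- the `for next_node in call_graph[current_node]` loop
  def pvDfsAL (call_graph : List (String × List String)) :
      Nat → List String → PySem.Set String × List String → PySem.Set String × List String
    | _, [], st => st
    | f, c :: cs, st =>
      if PySem.Set.contains st.1 c then pvDfsAL call_graph f cs st
      else pvDfsAL call_graph f cs (pvDfsA call_graph f c st)
  termination_by f cs _ => (f, cs.length + 1)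
end

def api_identification (call_graph : List (String × List String)) (node : String) : List String :=
  (pvDfsA call_graph ((call_graph.flatMap Prod.snd).length + 1) node (PySem.Set.empty, [])).2

-- ===== PORT B =====
-- the `while stack:` loop of Source B; each iterator on the stack is modelled by its remaining
-- suffix; the step count is bounded by (L+2)*(L+3) (L = #all callees), so fuel never runs out.
def pvRunB (call_graph : List (String × List String)) :
    Nat → PySem.Set String × List String × List (List String) → List String
  | 0, st => st.2.1
  | f + 1, (v, acc, stack) =>
    match stack with
    | [] => acc
    | [] :: rest => pvRunB call_graph f (v, acc, rest)        -- StopIteration: pop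
    | (c :: cs) :: rest =>
      if PySem.Set.contains v c then pvRunB call_graph f (v, acc, cs :: rest)
      else
        let v' := PySem.Set.add v c
        match call_graph.lookup c with
        | some ch => pvRunB call_graph f (v', acc, ch :: cs :: rest)
        | none => pvRunB call_graph f (v', acc ++ [c], cs :: rest)

def api_identification_alt (call_graph : List (String × List String)) (node : String) : List String :=
  let v := PySem.Set.add PySem.Set.empty node
  match call_graph.lookup node with
  | none => [node]
  | some ch =>
    pvRunB call_graph
      (((call_graph.flatMap Prod.snd).length + 2) * ((call_graph.flatMap Prod.snd).length + 3))
      (v, [], [ch])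

-- ===== PRECONDITION & SPEC =====
def Spec_api_identification (call_graph : List (String × List String)) (node : String) (out : List String) : Prop := out = api_identification_alt call_graph node
instance (call_graph : List (String × List String)) (node : String) (out : List String) : Decidable (Spec_api_identification call_graph node out) := by unfold Spec_api_identification; infer_instance

-- ===== CLAIM (what is proved, stated in full; the proofs are below) =====
def Claim_equal_api_identification : Prop := ∀ (call_graph : List (String × List String)) (node : String), Dom_api_identification call_graph node → Spec_api_identification call_graph node (api_identification call_graph node)

-- ===== LEMMAS AND PROOFS =====

-- all callee names occurring in the graph
def pvFlat (g : List (String × List String)) : List String := g.flatMap Prod.snd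

-- number of distinct callees not yet visited
def pvMu (g : List (String × List String)) (v : PySem.Set String) : Nat :=
  ((PySem.Set.ofList (pvFlat g)).filter (fun x => ! PySem.Set.contains v x)).length

lemma pvLookup_sub {g : List (String × List String)} {k : String} {vs : List String}
    (h : g.lookup k = some vs) : (∀ x ∈ vs, x ∈ pvFlat g) ∧ vs.length ≤ (pvFlat g).length := by
  induction g with
  | nil => simp [List.lookup] at h
  | cons p rest ih =>
    rw [List.lookup] at h
    by_cases hk : (k == p.1) = true
    · rw [hk] at h
      simp only [Option.some.injEq] at h
      subst h
      constructor
      · intro x hx; simp [pvFlat]; exact Or.inl hx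
      · simp [pvFlat]
    · rw [Bool.eq_false_iff.mpr hk] at h
      obtain ⟨h1, h2⟩ := ih h
      constructor
      · intro x hx
        have := h1 x hx
        simp [pvFlat] at this ⊢
        exact Or.inr this
      · simp [pvFlat] at h2 ⊢
        omega

lemma pvMu_le (g : List (String × List String)) (v : PySem.Set String) :
    pvMu g v ≤ (pvFlat g).length :=
  le_trans (List.length_filter_le _ _) (PySem.Set.length_ofList_le _)

lemma pvMu_mono {g : List (String × List String)} {v w : PySem.Set String}
    (h : ∀ x, x ∈ v → x ∈ w) : pvMu g w ≤ pvMu g v := by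
  unfold pvMu
  apply List.Sublist.length_le
  apply List.monotone_filter_right
  intro x hx
  simp only [PySem.Set.contains_eq_listContains, Bool.not_eq_eq_eq_not, Bool.not_true,
    List.contains_eq_mem, decide_eq_false_iff_not] at hx ⊢
  exact fun hv => hx (h x hv)

lemma pvMu_add_lt {g : List (String × List String)} {v : PySem.Set String} {c : String}
    (hc : c ∈ pvFlat g) (hv : c ∉ v) : pvMu g (PySem.Set.add v c) < pvMu g v := by
  unfold pvMu
  have hfe : (PySem.Set.ofList (pvFlat g)).filter (fun x => ! PySem.Set.contains (PySem.Set.add v c) x)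
      = ((PySem.Set.ofList (pvFlat g)).filter (fun x => ! PySem.Set.contains v x)).filter
          (fun x => x ≠ c) := by
    rw [List.filter_filter]
    apply List.filter_congr
    intro x _
    have hmem : x ∈ PySem.Set.add v c ↔ x ∈ v ∨ x = c := PySem.Set.mem_add v c x
    by_cases hxv : x ∈ v <;> by_cases hxc : x = c <;>
      simp [PySem.Set.contains_eq_listContains, List.contains_eq_mem, hxv, hxc, hmem]
  rw [hfe]
  have hcmem : c ∈ (PySem.Set.ofList (pvFlat g)).filter (fun x => ! PySem.Set.contains v x) := by
    rw [List.mem_filter]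
    refine ⟨(PySem.Set.mem_ofList _ _).mpr hc, by
      simp only [PySem.Set.contains_eq_listContains, List.contains_eq_mem,
        Bool.not_eq_eq_eq_not, Bool.not_true, decide_eq_false_iff_not]
      exact hv⟩
  rw [List.length_filter_lt_length_iff_exists]
  exact ⟨c, hcmem, by simp⟩

-- visited only grows
lemma pvDfs_mono (g : List (String × List String)) :
    ∀ f, (∀ c st, ∀ x ∈ st.1, x ∈ (pvDfsA g f c st).1)
      ∧ (∀ cs st, ∀ x ∈ st.1, x ∈ (pvDfsAL g f cs st).1) := by
  intro f
  induction f with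
  | zero =>
    constructor
    · intro c st x hx; rw [pvDfsA]; exact hx
    · intro cs
      induction cs with
      | nil => intro st x hx; rw [pvDfsAL]; exact hx
      | cons c cs ihc =>
        intro st x hx
        rw [pvDfsAL]
        split
        · exact ihc st x hx
        · refine ihc _ x ?_
          rw [pvDfsA]; exact hx
  | succ f ih =>
    have hA : ∀ c st, ∀ x ∈ st.1, x ∈ (pvDfsA g (f+1) c st).1 := by
      intro c st x hx
      rw [pvDfsA]
      cases hl : g.lookup c with
      | none => exact (PySem.Set.mem_add st.1 c x).mpr (Or.inl hx)
      | some ch => exact ih.2 ch _ x ((PySem.Set.mem_add st.1 c x).mpr (Or.inl hx))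
    refine ⟨hA, ?_⟩
    intro cs
    induction cs with
    | nil => intro st x hx; rw [pvDfsAL]; exact hx
    | cons c cs ihc =>
      intro st x hx
      rw [pvDfsAL]
      split
      · exact ihc st x hx
      · exact ihc _ x (hA c st x hx)

lemma pvDfsA_mono_add (g : List (String × List String)) (f : Nat) (c : String)
    (st : PySem.Set String × List String) :
    ∀ x ∈ PySem.Set.add st.1 c, x ∈ (pvDfsA g (f+1) c st).1 := by
  intro x hx
  rw [pvDfsA]
  cases hl : g.lookup c with
  | none => exact hx
  | some ch => exact (pvDfs_mono g f).2 ch _ x hx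

-- fuel stability: with fuel ≥ pvMu the result no longer depends on the fuel
lemma pvDfsAL_stable (g : List (String × List String)) :
    ∀ n cs st f, (∀ c ∈ cs, c ∈ pvFlat g) → pvMu g st.1 ≤ f → pvMu g st.1 ≤ n →
      pvDfsAL g f cs st = pvDfsAL g (f+1) cs st := by
  intro n
  induction n with
  | zero =>
    intro cs
    induction cs with
    | nil => intro st f _ _ _; rw [pvDfsAL, pvDfsAL]
    | cons c cs ihc =>
      intro st f hcs hf hn
      rw [pvDfsAL, pvDfsAL]
      split
      · exact ihc st f (fun x hx => hcs x (List.mem_cons_of_mem _ hx)) hf hn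
      · rename_i hcv
        exfalso
        have hc : c ∉ st.1 := by
          intro h
          exact hcv (by simpa [PySem.Set.contains_eq_listContains, List.contains_eq_mem] using h)
        have := pvMu_add_lt (hcs c List.mem_cons_self) hc
        omega
  | succ n ihn =>
    intro cs
    induction cs with
    | nil => intro st f _ _ _; rw [pvDfsAL, pvDfsAL]
    | cons c cs ihc =>
      intro st f hcs hf hn
      rw [pvDfsAL, pvDfsAL]
      split
      · exact ihc st f (fun x hx => hcs x (List.mem_cons_of_mem _ hx)) hf hn
      · rename_i hcv
        have hc : c ∉ st.1 := by
          intro h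
          exact hcv (by simpa [PySem.Set.contains_eq_listContains, List.contains_eq_mem] using h)
        have hcf : c ∈ pvFlat g := hcs c List.mem_cons_self
        have hlt := pvMu_add_lt hcf hc
        obtain ⟨f', rfl⟩ : ∃ f', f = f' + 1 := ⟨f - 1, by omega⟩
        have hAstable : pvDfsA g (f'+1) c st = pvDfsA g (f'+1+1) c st := by
          rw [pvDfsA, pvDfsA]
          cases hl : g.lookup c with
          | none => rfl
          | some ch =>
            have he : pvMu g ((PySem.Set.add st.1 c, st.2) :
                PySem.Set String × List String).1 = pvMu g (PySem.Set.add st.1 c) := rfl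
            exact ihn ch (PySem.Set.add st.1 c, st.2) f' ((pvLookup_sub hl).1)
              (by rw [he]; omega) (by rw [he]; omega)
        rw [← hAstable]
        have hsub : ∀ x ∈ PySem.Set.add st.1 c, x ∈ (pvDfsA g (f'+1) c st).1 :=
          pvDfsA_mono_add g f' c st
        have hmu2 : pvMu g (pvDfsA g (f'+1) c st).1 ≤ pvMu g (PySem.Set.add st.1 c) :=
          pvMu_mono hsub
        exact ihc (pvDfsA g (f'+1) c st) (f'+1)
          (fun x hx => hcs x (List.mem_cons_of_mem _ hx)) (by omega) (by omega)

lemma pvDfsAL_stable_ge (g : List (String × List String)) (cs : List String)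
    (st : PySem.Set String × List String) (f f' : Nat)
    (hcs : ∀ c ∈ cs, c ∈ pvFlat g) (hf : pvMu g st.1 ≤ f) (hle : f ≤ f') :
    pvDfsAL g f cs st = pvDfsAL g f' cs st := by
  induction f', hle using Nat.le_induction with
  | base => rfl
  | succ f' hle ih =>
    rw [ih]
    exact pvDfsAL_stable g (pvMu g st.1) cs st f' hcs (by omega) le_rfl

-- the denotation of a machine stack in terms of A's loop, at the canonical big fuel L+1
def pvDen (g : List (String × List String)) (st : PySem.Set String × List String)
    (frames : List (List String)) : PySem.Set String × List String :=
  frames.foldl (fun s cs => pvDfsAL g ((pvFlat g).length + 1) cs s) st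

-- the machine's potential: remaining items + frames + (L+2) per unvisited callee
def pvPhi (g : List (String × List String)) (v : PySem.Set String)
    (frames : List (List String)) : Nat :=
  (frames.map List.length).sum + frames.length + pvMu g v * ((pvFlat g).length + 2)

lemma pvRunB_sim (g : List (String × List String)) :
    ∀ f v acc frames, (∀ cs ∈ frames, ∀ c ∈ cs, c ∈ pvFlat g) →
      pvPhi g v frames ≤ f →
      pvRunB g f (v, acc, frames) = (pvDen g (v, acc) frames).2 := by
  intro f
  induction f with
  | zero =>
    intro v acc frames hfr hphi
    cases frames with
    | nil => rw [pvRunB]; simp [pvDen]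
    | cons a b =>
      exfalso
      unfold pvPhi at hphi
      simp only [List.map_cons, List.sum_cons, List.length_cons] at hphi
      omega
  | succ f ih =>
    intro v acc frames hfr hphi
    cases frames with
    | nil => rw [pvRunB]; simp [pvDen]
    | cons fr rest =>
      cases fr with
      | nil =>
        rw [pvRunB]
        rw [ih v acc rest (fun cs hcs => hfr cs (List.mem_cons_of_mem _ hcs)) ?_]
        · unfold pvDen
          rw [List.foldl_cons, pvDfsAL]
        · unfold pvPhi at hphi ⊢
          simp only [List.map_cons, List.sum_cons, List.length_cons] at hphi
          omega
      | cons c cs =>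
        have hfr' : ∀ l ∈ cs :: rest, ∀ x ∈ l, x ∈ pvFlat g := by
          intro l hl' x hx
          rcases List.mem_cons.mp hl' with rfl | h
          · exact hfr (c :: l) List.mem_cons_self x (List.mem_cons_of_mem _ hx)
          · exact hfr l (List.mem_cons_of_mem _ h) x hx
        rw [pvRunB]
        by_cases hcv : PySem.Set.contains v c = true
        · rw [if_pos hcv]
          rw [ih v acc (cs :: rest) hfr' ?_]
          · unfold pvDen
            rw [List.foldl_cons, List.foldl_cons, pvDfsAL, if_pos hcv]
          · unfold pvPhi at hphi ⊢
            simp only [List.map_cons, List.sum_cons, List.length_cons] at hphi ⊢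
            omega
        · rw [if_neg hcv]
          have hc : c ∉ v := by
            intro h
            exact hcv (by simpa [PySem.Set.contains_eq_listContains, List.contains_eq_mem] using h)
          have hcf : c ∈ pvFlat g :=
            hfr (c :: cs) List.mem_cons_self c List.mem_cons_self
          have hlt := pvMu_add_lt hcf hc
          have hm : (pvMu g (PySem.Set.add v c) + 1) * ((pvFlat g).length + 2)
              ≤ pvMu g v * ((pvFlat g).length + 2) :=
            Nat.mul_le_mul_right _ (by omega)
          have hm' : (pvMu g (PySem.Set.add v c) + 1) * ((pvFlat g).length + 2)
              = pvMu g (PySem.Set.add v c) * ((pvFlat g).length + 2) + ((pvFlat g).length + 2) := by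
            ring
          cases hl : g.lookup c with
          | none =>
            show pvRunB g f (PySem.Set.add v c, acc ++ [c], cs :: rest)
              = (pvDen g (v, acc) ((c :: cs) :: rest)).2
            rw [ih (PySem.Set.add v c) (acc ++ [c]) (cs :: rest) hfr' ?_]
            · unfold pvDen
              rw [List.foldl_cons, List.foldl_cons, pvDfsAL, if_neg hcv]
              have hA : pvDfsA g ((pvFlat g).length + 1) c (v, acc)
                  = (PySem.Set.add v c, acc ++ [c]) := by
                rw [pvDfsA, hl]
              rw [hA]
            · unfold pvPhi at hphi ⊢
              simp only [List.map_cons, List.sum_cons, List.length_cons] at hphi ⊢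
              omega
          | some ch =>
            have hchsub := pvLookup_sub hl
            have hfr'' : ∀ l ∈ ch :: cs :: rest, ∀ x ∈ l, x ∈ pvFlat g := by
              intro l hl' x hx
              rcases List.mem_cons.mp hl' with rfl | h
              · exact hchsub.1 x hx
              · exact hfr' l h x hx
            show pvRunB g f (PySem.Set.add v c, acc, ch :: cs :: rest)
              = (pvDen g (v, acc) ((c :: cs) :: rest)).2
            rw [ih (PySem.Set.add v c) acc (ch :: cs :: rest) hfr'' ?_]
            · have hA : pvDfsA g ((pvFlat g).length + 1) c (v, acc)
                  = pvDfsAL g ((pvFlat g).length + 1) ch (PySem.Set.add v c, acc) := by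
                rw [pvDfsA, hl]
                exact pvDfsAL_stable_ge g ch _ ((pvFlat g).length) ((pvFlat g).length + 1)
                  hchsub.1 (pvMu_le g _) (by omega)
              unfold pvDen
              rw [List.foldl_cons, List.foldl_cons, List.foldl_cons, pvDfsAL, if_neg hcv, hA]
            · unfold pvPhi at hphi ⊢
              simp only [List.map_cons, List.sum_cons, List.length_cons] at hphi ⊢
              have hchlen := hchsub.2
              omega

-- ===== VERDICT (by name: the statement is the Claim_ definition above) =====
theorem api_identification_spec : Claim_equal_api_identification := by
  intro g node _
  unfold Spec_api_identification api_identification api_identification_alt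
  cases hl : g.lookup node with
  | none =>
    rw [pvDfsA, hl]
    simp
  | some ch =>
    simp only
    rw [pvDfsA, hl]
    simp only
    have hchsub := pvLookup_sub hl
    have hmu : pvMu g (PySem.Set.add PySem.Set.empty node) ≤ (pvFlat g).length :=
      pvMu_le g _
    rw [show (g.flatMap Prod.snd) = pvFlat g from rfl]
    rw [pvDfsAL_stable_ge g ch _ ((pvFlat g).length) ((pvFlat g).length + 1)
        hchsub.1 hmu (by omega)]
    rw [pvRunB_sim g _ _ _ [ch]
        (by intro cs hcs x hx; simp at hcs; subst hcs; exact hchsub.1 x hx) ?_]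
    · simp [pvDen]
    · unfold pvPhi
      simp
      have h1 := hchsub.2
      have h2 := pvMu_le g [node]
      have h3 := Nat.mul_le_mul_right ((pvFlat g).length + 2) h2
      nlinarith
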